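-- pv_equiv track=rewrite | github.com/AntoineHo/hap_phase | concat.py | consensus_haplotypes
-- ===== SOURCE A (Python) =====
-- def consensus_haplotypes(h1, h2) :
--
--     consensus = ""
--     for i, j in zip(h1, h2) :
--         if i == j :
--             consensus += i
--         elif any(n == "A" for n in [i,j]) and any(n == "T" for n in [i,j]) : # weak
--             consensus += "W"
--         elif any(n == "C" for n in [i,j]) and any(n == "G" for n in [i,j]) : # strong - CG
--             consensus += "S"
--         elif any(n == "A" for n in [i,j]) and any(n == "C" for n in [i,j]) : # amino - AC
--             consensus += "M"
--         elif any(n == "G" for n in [i,j]) and any(n == "T" for n in [i,j]) : # ketone - GT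
--             consensus += "K"
--         elif any(n == "A" for n in [i,j]) and any(n == "G" for n in [i,j]) : # purine - AG
--             consensus += "R"
--         elif any(n == "C" for n in [i,j]) and any(n == "T" for n in [i,j]) : # pyrimidine - CT
--             consensus += "Y"
--         else :
--             if i == '-' :
--                 consensus += j # if any haplotype has a gap
--             elif j == '-' :
--                 consensus += i
--             else :
--                 consensus += '-'
--
--     return consensus
-- ===== SOURCE B (Python) =====
-- _BIT = {'A': 1, 'C': 2, 'G': 4, 'T': 8}
-- _CODE = "?ACMGRSVTWYHKDBN"
--
-- def consensus_haplotypes(h1, h2):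
--     def pos(i, j):
--         if i == j:
--             return i
--         bi = _BIT.get(i, 0)
--         bj = _BIT.get(j, 0)
--         if bi and bj:
--             return _CODE[bi | bj]
--         if i == '-':
--             return j
--         if j == '-':
--             return i
--         return '-'
--     return ''.join(map(pos, h1, h2))
-- ===== Notes on version B (the rewrite author's own statement) =====
-- stated objective: faster
-- what changed: Replaces the six any-based branch pairs with an arithmetic encoding: each nucleotide maps to a bit value (A=1,C=2,G=4,T=8), the two bits are OR-ed and index a fixed IUPAC code string, so the ambiguity code is computed by arithmetic instead of a branch chain; characters are produced by map and joined once instead of repeated string concatenation.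
import Mathlib
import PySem

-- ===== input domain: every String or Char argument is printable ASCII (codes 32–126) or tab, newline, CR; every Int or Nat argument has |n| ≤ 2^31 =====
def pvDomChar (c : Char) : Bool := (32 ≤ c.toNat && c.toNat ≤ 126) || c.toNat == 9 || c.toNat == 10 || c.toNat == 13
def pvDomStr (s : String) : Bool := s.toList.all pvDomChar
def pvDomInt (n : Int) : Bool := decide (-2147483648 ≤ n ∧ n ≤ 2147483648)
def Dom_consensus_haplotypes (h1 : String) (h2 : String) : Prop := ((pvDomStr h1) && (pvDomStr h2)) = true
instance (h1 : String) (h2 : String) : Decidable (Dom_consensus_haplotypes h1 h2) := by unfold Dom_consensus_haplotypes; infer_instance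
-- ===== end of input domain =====

-- B computes each IUPAC ambiguity code arithmetically (bit per nucleotide, OR of the
-- two bits indexes a fixed code string) instead of A's six any-based branch pairs;
-- objective: faster (constant-factor: no per-position generator scans, one join).

-- ===== PORT A =====
-- any(n == c for n in [i,j])
def pvAny2 (i j c : Char) : Bool := [i, j].any (fun n => n == c)

-- character appended by A's branch chain at one zipped position
def pvStepA (i j : Char) : Char :=
  if i = j then i
  else if pvAny2 i j 'A' && pvAny2 i j 'T' then 'W'
  else if pvAny2 i j 'C' && pvAny2 i j 'G' then 'S'
  else if pvAny2 i j 'A' && pvAny2 i j 'C' then 'M'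
  else if pvAny2 i j 'G' && pvAny2 i j 'T' then 'K'
  else if pvAny2 i j 'A' && pvAny2 i j 'G' then 'R'
  else if pvAny2 i j 'C' && pvAny2 i j 'T' then 'Y'
  else if i = '-' then j
  else if j = '-' then i
  else '-'

def consensus_haplotypes (h1 : String) (h2 : String) : String :=
  (List.zip h1.toList h2.toList).foldl
    (fun consensus p => consensus.push (pvStepA p.1 p.2)) ""

-- ===== PORT B =====
-- _BIT = {'A': 1, 'C': 2, 'G': 4, 'T': 8}
def pvBITdict : PySem.Dict Char Nat :=
  PySem.Dict.ofList [('A', 1), ('C', 2), ('G', 4), ('T', 8)]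

-- _CODE = "?ACMGRSVTWYHKDBN"; _CODE[m] — m is always in range here, so plain
-- list indexing with a default is exact
def pvCODE (m : Nat) : Char := "?ACMGRSVTWYHKDBN".toList.getD m '?'

-- the inner 'pos' function of Source B
def pvStepB (i j : Char) : Char :=
  if i = j then i
  else
    let bi := PySem.Dict.getD pvBITdict i 0
    let bj := PySem.Dict.getD pvBITdict j 0
    if bi ≠ 0 ∧ bj ≠ 0 then pvCODE (bi ||| bj)
    else if i = '-' then j
    else if j = '-' then i
    else '-'

def consensus_haplotypes_alt (h1 : String) (h2 : String) : String :=
  String.ofList ((List.zip h1.toList h2.toList).map (fun p => pvStepB p.1 p.2))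

-- ===== PRECONDITION & SPEC =====
def Spec_consensus_haplotypes (h1 : String) (h2 : String) (out : String) : Prop := out = consensus_haplotypes_alt h1 h2
instance (h1 : String) (h2 : String) (out : String) : Decidable (Spec_consensus_haplotypes h1 h2 out) := by unfold Spec_consensus_haplotypes; infer_instance

-- ===== CLAIM (what is proved, stated in full; the proofs are below) =====
def Claim_equal_consensus_haplotypes : Prop := ∀ (h1 : String) (h2 : String), Dom_consensus_haplotypes h1 h2 → Spec_consensus_haplotypes h1 h2 (consensus_haplotypes h1 h2)

-- ===== LEMMAS AND PROOFS =====

theorem pvBit_eq (c : Char) : PySem.Dict.getD pvBITdict c 0 =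
    if c = 'A' then 1 else if c = 'C' then 2 else if c = 'G' then 4
    else if c = 'T' then 8 else 0 := by
  have h : pvBITdict = PySem.Dict.mk [('A', 1), ('C', 2), ('G', 4), ('T', 8)] := by decide
  rw [h]
  simp only [PySem.Dict.getD, PySem.Dict.get?_mk_cons, beq_iff_eq]
  split_ifs <;> simp_all [PySem.Dict.get?, eq_comm]

set_option maxHeartbeats 1000000 in
theorem pvStep_eq (i j : Char) : pvStepA i j = pvStepB i j := by
  unfold pvStepA pvStepB pvAny2
  by_cases hij : i = j
  · simp [hij]
  · simp only [if_neg hij, List.any_cons, List.any_nil, Bool.or_false, pvBit_eq]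
    by_cases hiA : i = 'A' <;> by_cases hjA : j = 'A' <;>
    by_cases hiC : i = 'C' <;> by_cases hjC : j = 'C' <;>
    by_cases hiG : i = 'G' <;> by_cases hjG : j = 'G' <;>
    by_cases hiT : i = 'T' <;> by_cases hjT : j = 'T' <;>
    by_cases hiD : i = '-' <;> by_cases hjD : j = '-' <;>
      simp_all [pvCODE] <;> simp_all [eq_comm]

theorem pvFoldl_push (zs : List (Char × Char)) (acc : String) :
    zs.foldl (fun consensus p => consensus.push (pvStepA p.1 p.2)) acc
      = acc ++ String.ofList (zs.map (fun p => pvStepB p.1 p.2)) := by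
  induction zs generalizing acc with
  | nil =>
      apply String.toList_inj.mp
      simp
  | cons z zs ih =>
      rw [List.foldl_cons, ih, pvStep_eq]
      apply String.toList_inj.mp
      simp

-- ===== VERDICT (by name: the statement is the Claim_ definition above) =====
theorem consensus_haplotypes_spec : Claim_equal_consensus_haplotypes := by
  intro h1 h2 _
  unfold Spec_consensus_haplotypes consensus_haplotypes consensus_haplotypes_alt
  rw [pvFoldl_push]
  apply String.toList_inj.mp
  simp
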